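-- pv_equiv track=rewrite | github.com/naftifine/Introduction-to-AI-CO3061 | minesweeper_ai.py | _check_assignment_possible
-- ===== SOURCE A (Python) =====
-- from itertools import combinations
--
-- def _check_assignment_possible(cells, constraints, target_cell, is_mine):
--     target_constraints = []
--     for cell_tuple, count in constraints:
--         if target_cell in cell_tuple:
--             target_constraints.append((cell_tuple, count))
--
--     cells_to_try = set()
--     for cell_tuple, _ in target_constraints:
--         cells_to_try.update(cell_tuple)
--     cells_to_try.discard(target_cell)
--     cells_list = list(cells_to_try)
--
--     if len(cells_list) > 15:
--         return True
--
--     all_relevant_constraints = []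
--     involved = cells_to_try | {target_cell}
--     for cell_tuple, count in constraints:
--         if set(cell_tuple) & involved:
--             all_relevant_constraints.append((cell_tuple, count))
--
--     for num_mines in range(len(cells_list) + 1):
--         for mine_combo in combinations(cells_list, num_mines):
--             mine_set = set(mine_combo)
--             if is_mine:
--                 mine_set.add(target_cell)
--
--             assigned = cells_to_try | {target_cell}
--             valid = True
--             for cell_tuple, count in all_relevant_constraints:
--                 mines_in_constraint = sum(1 for c in cell_tuple if c in mine_set)
--                 unassigned_in_constraint = [c for c in cell_tuple if c not in assigned]
--
--                 if not unassigned_in_constraint: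
--                     if mines_in_constraint != count:
--                         valid = False
--                         break
--                 else:
--                     if mines_in_constraint > count:
--                         valid = False
--                         break
--                     if mines_in_constraint + len(unassigned_in_constraint) < count:
--                         valid = False
--                         break
--
--             if valid:
--                 return True
--
--     return False
-- ===== SOURCE B (Python) =====
-- def _check_assignment_possible(cells, constraints, target_cell, is_mine):
--     # Backtracking CSP search: assign each relevant cell mine/safe one at a time,
--     # pruning branches whose partial assignment already violates a constraint.
--     target_constraints = [(ct, n) for ct, n in constraints if target_cell in ct]
--     cells_to_try = set()
--     for ct, _ in target_constraints:
--         cells_to_try.update(ct)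
--     cells_to_try.discard(target_cell)
--     cells_list = list(cells_to_try)
--     if len(cells_list) > 15:
--         return True
--     involved = cells_to_try | {target_cell}
--     relevant = [(ct, n) for ct, n in constraints if set(ct) & involved]
--
--     def feasible(mines, remaining):
--         # mines: cells already assigned mine; remaining: cells still undecided.
--         for ct, n in relevant:
--             m = sum(1 for c in ct if c in mines)
--             pot = sum(1 for c in ct if c in remaining or c not in involved)
--             if m > n or m + pot < n:
--                 return False
--         return True
--
--     def bt(mines, remaining):
--         if not feasible(mines, remaining):
--             return False
--         if not remaining:
--             return True
--         c = remaining[0]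
--         rest = remaining[1:]
--         return bt(mines, rest) or bt(mines | {c}, rest)
--
--     return bt({target_cell} if is_mine else set(), cells_list)
-- ===== Notes on version B (the rewrite author's own statement) =====
-- stated objective: alternative
-- what changed: A's size-ordered exhaustive enumeration of all 2^n mine combinations (itertools.combinations for every k, full constraint re-check per combination) is replaced by a depth-first backtracking search that assigns one cell at a time and prunes any branch whose partial assignment already violates a constraint's lower or upper bound.
import Mathlib
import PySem

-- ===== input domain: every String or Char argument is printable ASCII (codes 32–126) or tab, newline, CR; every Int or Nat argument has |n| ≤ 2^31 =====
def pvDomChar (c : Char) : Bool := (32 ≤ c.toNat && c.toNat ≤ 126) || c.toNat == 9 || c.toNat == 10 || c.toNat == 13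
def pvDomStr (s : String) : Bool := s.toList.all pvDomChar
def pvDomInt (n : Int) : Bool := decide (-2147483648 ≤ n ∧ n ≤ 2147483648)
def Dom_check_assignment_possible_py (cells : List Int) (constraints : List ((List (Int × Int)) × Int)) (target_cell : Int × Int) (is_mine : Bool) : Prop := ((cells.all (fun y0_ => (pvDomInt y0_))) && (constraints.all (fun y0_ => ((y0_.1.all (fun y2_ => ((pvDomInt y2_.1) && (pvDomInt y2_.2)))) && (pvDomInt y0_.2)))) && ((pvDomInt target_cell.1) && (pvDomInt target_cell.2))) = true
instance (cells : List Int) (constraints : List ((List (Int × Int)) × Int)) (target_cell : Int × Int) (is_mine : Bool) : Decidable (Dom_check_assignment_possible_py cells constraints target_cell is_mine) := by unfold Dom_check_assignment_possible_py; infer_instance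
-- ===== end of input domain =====

-- B replaces A's size-ordered enumeration of all mine combinations (itertools.combinations for
-- every k) by a depth-first backtracking search that assigns one cell at a time and prunes any
-- branch whose partial assignment already violates a constraint bound (objective: alternative).
-- The unused parameter `cells` is kept, as in the Python.

-- ===== PORT A =====
-- A's inner per-combination constraint check (`assigned` is A's cells_to_try | {target_cell}).
def pvCheckA (relevant : List ((List (Int × Int)) × Int)) (assigned : List (Int × Int))
    (mineSet : List (Int × Int)) : Bool :=
  relevant.all (fun p =>
    let mines : Int := ((p.1.countP (fun c => mineSet.contains c) : Nat) : Int)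
    let unassigned := p.1.filter (fun c => !(assigned.contains c))
    if unassigned.isEmpty then mines == p.2
    else if mines > p.2 then false
    else if mines + (unassigned.length : Nat) < p.2 then false
    else true)

def check_assignment_possible_py (cells : List Int) (constraints : List ((List (Int × Int)) × Int)) (target_cell : Int × Int) (is_mine : Bool) : Bool :=
  let targetConstraints := constraints.filter (fun p => p.1.contains target_cell)
  let cellsToTry : PySem.Set (Int × Int) :=
    PySem.Set.discard (targetConstraints.foldl (fun s p => PySem.Set.update s p.1) PySem.Set.empty) target_cell
  let cellsList := cellsToTry   -- list(cells_to_try); only consumed order-insensitively below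
  if cellsList.length > 15 then true
  else
    -- `involved` = cells_to_try | {target_cell}; A's `assigned` is the same expression
    let involved := PySem.Set.union cellsToTry [target_cell]
    let relevant := constraints.filter (fun p => !(PySem.Set.inter (PySem.Set.ofList p.1) involved).isEmpty)
    (List.range (cellsList.length + 1)).any (fun k =>
      (List.sublistsLen k cellsList).any (fun combo =>
        let mineSet := if is_mine then PySem.Set.add (PySem.Set.ofList combo) target_cell
                       else PySem.Set.ofList combo
        pvCheckA relevant involved mineSet))

-- ===== PORT B =====
-- Source B's `feasible(mines, remaining)`: partial-assignment pruning check.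
def pvFeasible (relevant : List ((List (Int × Int)) × Int)) (involved : List (Int × Int))
    (mines remaining : List (Int × Int)) : Bool :=
  relevant.all (fun p =>
    let m : Int := ((p.1.countP (fun c => mines.contains c) : Nat) : Int)
    let pot : Int := ((p.1.countP (fun c => remaining.contains c || !(involved.contains c)) : Nat) : Int)
    !(decide (m > p.2) || decide (m + pot < p.2)))

-- Source B's `bt(mines, remaining)`: backtracking over the undecided cells.
def pvBT (relevant : List ((List (Int × Int)) × Int)) (involved : List (Int × Int)) :
    List (Int × Int) → List (Int × Int) → Bool
  | mines, [] => if !(pvFeasible relevant involved mines []) then false else true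
  | mines, c :: rest =>
    if !(pvFeasible relevant involved mines (c :: rest)) then false
    else pvBT relevant involved mines rest || pvBT relevant involved (PySem.Set.add mines c) rest

def check_assignment_possible_py_alt (cells : List Int) (constraints : List ((List (Int × Int)) × Int)) (target_cell : Int × Int) (is_mine : Bool) : Bool :=
  let targetConstraints := constraints.filter (fun p => p.1.contains target_cell)
  let cellsToTry : PySem.Set (Int × Int) :=
    PySem.Set.discard (targetConstraints.foldl (fun s p => PySem.Set.update s p.1) PySem.Set.empty) target_cell
  let cellsList := cellsToTry
  if cellsList.length > 15 then true
  else
    let involved := PySem.Set.union cellsToTry [target_cell]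
    let relevant := constraints.filter (fun p => !(PySem.Set.inter (PySem.Set.ofList p.1) involved).isEmpty)
    pvBT relevant involved (if is_mine then [target_cell] else []) cellsList

-- ===== PRECONDITION & SPEC =====
def Spec_check_assignment_possible_py (cells : List Int) (constraints : List ((List (Int × Int)) × Int)) (target_cell : Int × Int) (is_mine : Bool) (out : Bool) : Prop := out = check_assignment_possible_py_alt cells constraints target_cell is_mine
instance (cells : List Int) (constraints : List ((List (Int × Int)) × Int)) (target_cell : Int × Int) (is_mine : Bool) (out : Bool) : Decidable (Spec_check_assignment_possible_py cells constraints target_cell is_mine out) := by unfold Spec_check_assignment_possible_py; infer_instance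

-- ===== CLAIM (what is proved, stated in full; the proofs are below) =====
def Claim_equal_check_assignment_possible_py : Prop := ∀ (cells : List Int) (constraints : List ((List (Int × Int)) × Int)) (target_cell : Int × Int) (is_mine : Bool), Dom_check_assignment_possible_py cells constraints target_cell is_mine → Spec_check_assignment_possible_py cells constraints target_cell is_mine (check_assignment_possible_py cells constraints target_cell is_mine)

-- ===== LEMMAS AND PROOFS =====

-- Both programs count mines in a constraint only through membership in the mine set.
theorem pv_countP_mem_congr (l m1 m2 : List (Int × Int)) (h : ∀ x, x ∈ m1 ↔ x ∈ m2) :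
    l.countP (fun c => m1.contains c) = l.countP (fun c => m2.contains c) := by
  apply List.countP_congr
  intro a _
  rw [List.contains_iff_mem, List.contains_iff_mem]
  exact h a

-- If every p-element is a q-element or an r-element, countP p ≤ countP q + countP r.
theorem pv_countP_le_add (l : List (Int × Int)) (p q r : (Int × Int) → Bool)
    (h : ∀ a, p a = true → q a = true ∨ r a = true) :
    l.countP p ≤ l.countP q + l.countP r := by
  induction l with
  | nil => simp
  | cons x xs ih =>
    simp only [List.countP_cons]
    by_cases hp : p x = true
    · rcases h x hp with hq | hr
      · simp [hp, hq]; omega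
      · by_cases hq : q x = true <;> simp [hp, hq, hr] <;> omega
    · simp only [Bool.not_eq_true] at hp
      by_cases hq : q x = true <;> by_cases hr : r x = true <;> simp [hp, hq, hr] <;> omega

-- For pointwise-incompatible q and r, countP q + countP r ≤ countP (q || r).
theorem pv_add_countP_le (l : List (Int × Int)) (q r : (Int × Int) → Bool)
    (h : ∀ a ∈ l, ¬(q a = true ∧ r a = true)) :
    l.countP q + l.countP r ≤ l.countP (fun a => q a || r a) := by
  induction l with
  | nil => simp
  | cons x xs ih =>
    simp only [List.countP_cons]
    have hx := h x (by simp)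
    have ihx := ih (fun a ha => h a (by simp [ha]))
    by_cases hq : q x = true <;> by_cases hr : r x = true <;>
      simp [hq, hr] at hx ⊢ <;> omega

-- The pruning check depends on `mines` only through membership.
theorem pv_feasible_mines_congr (rel : List ((List (Int × Int)) × Int)) (inv m1 m2 rem : List (Int × Int))
    (h : ∀ x, x ∈ m1 ↔ x ∈ m2) :
    pvFeasible rel inv m1 rem = pvFeasible rel inv m2 rem := by
  unfold pvFeasible
  refine List.all_congr rfl (fun p => ?_)
  simp only [pv_countP_mem_congr p.1 m1 m2 h]

-- On a complete assignment (remaining = []) the pruning check is A's per-combination check.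
theorem pv_feasible_nil_eq_checkA (rel : List ((List (Int × Int)) × Int)) (inv mines : List (Int × Int)) :
    pvFeasible rel inv mines [] = pvCheckA rel inv mines := by
  unfold pvFeasible pvCheckA
  refine List.all_congr rfl (fun p => ?_)
  simp only [List.contains_nil, Bool.false_or]
  have hu : (p.1.filter (fun c => !(inv.contains c))).length
      = p.1.countP (fun c => !(inv.contains c)) := List.countP_eq_length_filter.symm
  by_cases he : (p.1.filter (fun c => !(inv.contains c))).isEmpty
  · have h0 : p.1.countP (fun c => !(inv.contains c)) = 0 := by
      rw [← hu]; simpa [List.isEmpty_iff_length_eq_zero] using he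
    simp only [he, if_pos, h0]
    rcases Int.lt_trichotomy ((p.1.countP fun c => mines.contains c : Nat) : Int) p.2 with h | h | h <;>
      simp_all <;> omega
  · simp only [he, if_neg, Bool.false_eq_true, not_false_iff, hu]
    by_cases h1 : ((p.1.countP fun c => mines.contains c : Nat) : Int) > p.2 <;>
      by_cases h2 : ((p.1.countP fun c => mines.contains c : Nat) : Int)
          + ((p.1.countP (fun c => !(inv.contains c)) : Nat) : Int) < p.2 <;>
      simp_all <;> omega

-- Pruning never cuts a branch that extends to a valid complete assignment.
theorem pv_feasible_of_extension (rel : List ((List (Int × Int)) × Int)) (inv mines rem S : List (Int × Int))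
    (hri : ∀ c ∈ rem, c ∈ inv) (hS : S.Sublist rem)
    (hv : pvFeasible rel inv (S ++ mines) [] = true) :
    pvFeasible rel inv mines rem = true := by
  unfold pvFeasible at hv ⊢
  rw [List.all_eq_true] at hv ⊢
  intro p hp
  have h := hv p hp
  simp only [List.contains_nil, Bool.false_or, Bool.not_eq_eq_eq_not, Bool.not_true,
    Bool.or_eq_false_iff, decide_eq_false_iff_not, not_lt] at h ⊢
  obtain ⟨h1, h2⟩ := h
  -- m0 ≤ mf
  have hmono : p.1.countP (fun c => mines.contains c) ≤ p.1.countP (fun c => (S ++ mines).contains c) := by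
    apply List.countP_mono_left
    intro a _ ha
    have : a ∈ mines := List.contains_iff_mem.mp ha
    exact List.contains_iff_mem.mpr (by simp [this])
  -- mf ≤ m0 + r
  have hsplit : p.1.countP (fun c => (S ++ mines).contains c)
      ≤ p.1.countP (fun c => mines.contains c) + p.1.countP (fun c => rem.contains c) := by
    apply pv_countP_le_add
    intro a ha
    rcases List.mem_append.mp (List.contains_iff_mem.mp ha) with h | h
    · exact Or.inr (List.contains_iff_mem.mpr (hS.subset h))
    · exact Or.inl (List.contains_iff_mem.mpr h)
  -- r + u ≤ pot
  have hdisj : p.1.countP (fun c => rem.contains c) + p.1.countP (fun c => !(inv.contains c))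
      ≤ p.1.countP (fun c => rem.contains c || !(inv.contains c)) := by
    apply pv_add_countP_le
    intro a _ hqr
    obtain ⟨haq, har⟩ := hqr
    exact absurd (hri a (List.contains_iff_mem.mp haq)) (by simpa using har)
  constructor
  · exact le_trans (by exact_mod_cast hmono) h1
  · have := h2
    push_cast at this ⊢
    omega

-- Backtracking finds an assignment iff some subset of the undecided cells completes `mines` validly.
theorem pv_bt_iff (rel : List ((List (Int × Int)) × Int)) (inv : List (Int × Int)) :
    ∀ (rem mines : List (Int × Int)), (∀ c ∈ rem, c ∈ inv) →
    (pvBT rel inv mines rem = true ↔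
      ∃ S, S.Sublist rem ∧ pvFeasible rel inv (S ++ mines) [] = true) := by
  intro rem
  induction rem with
  | nil =>
    intro mines _
    constructor
    · intro h
      refine ⟨[], List.Sublist.refl _, ?_⟩
      by_cases hf : pvFeasible rel inv mines [] = true
      · simpa using hf
      · simp [pvBT, hf] at h
    · rintro ⟨S, hS, hv⟩
      have : S = [] := List.sublist_nil.mp hS
      subst this
      simp only [List.nil_append] at hv
      simp [pvBT, hv]
  | cons c rest ih =>
    intro mines hri
    have hrest : ∀ x ∈ rest, x ∈ inv := fun x hx => hri x (by simp [hx])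
    by_cases hf : pvFeasible rel inv mines (c :: rest) = true
    · rw [show pvBT rel inv mines (c :: rest)
          = (pvBT rel inv mines rest || pvBT rel inv (PySem.Set.add mines c) rest) by
        simp [pvBT, hf]]
      rw [Bool.or_eq_true, ih mines hrest, ih (PySem.Set.add mines c) hrest]
      constructor
      · rintro (⟨S, hS, hv⟩ | ⟨S, hS, hv⟩)
        · exact ⟨S, hS.trans (List.sublist_cons_self c rest), hv⟩
        · refine ⟨c :: S, List.cons_sublist_cons.mpr hS, ?_⟩
          rw [pv_feasible_mines_congr rel inv ((c :: S) ++ mines) (S ++ PySem.Set.add mines c) []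
            (by intro x; simp [PySem.Set.mem_add]; tauto)]
          exact hv
      · rintro ⟨S, hS, hv⟩
        rcases List.sublist_cons_iff.mp hS with h | ⟨r, rfl, hr⟩
        · exact Or.inl ⟨S, h, hv⟩
        · refine Or.inr ⟨r, hr, ?_⟩
          rw [pv_feasible_mines_congr rel inv (r ++ PySem.Set.add mines c) ((c :: r) ++ mines) []
            (by intro x; simp [PySem.Set.mem_add]; tauto)]
          exact hv
    · simp only [pvBT, hf]
      simp only [Bool.not_eq_true] at hf
      simp only [hf, Bool.not_false, if_pos, Bool.false_eq_true, false_iff]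
      rintro ⟨S, hS, hv⟩
      have := pv_feasible_of_extension rel inv mines (c :: rest) S hri hS hv
      simp [this] at hf

-- A's double `any` over combination sizes is an existential over sublists.
theorem pv_anyCombos_iff (cellsList : List (Int × Int)) (g : List (Int × Int) → Bool) :
    ((List.range (cellsList.length + 1)).any (fun k =>
      (List.sublistsLen k cellsList).any (fun combo => g combo)) = true)
    ↔ ∃ S, S.Sublist cellsList ∧ g S = true := by
  simp only [List.any_eq_true, List.mem_range, List.mem_sublistsLen]
  constructor
  · rintro ⟨k, _, combo, ⟨hsub, _⟩, hg⟩
    exact ⟨combo, hsub, hg⟩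
  · rintro ⟨S, hsub, hg⟩
    exact ⟨S.length, by have := hsub.length_le; omega, S, ⟨hsub, rfl⟩, hg⟩

-- The two programs agree once the shared preprocessing is factored out.
theorem pv_main (rel : List ((List (Int × Int)) × Int)) (inv cellsList : List (Int × Int))
    (target_cell : Int × Int) (is_mine : Bool) (hri : ∀ c ∈ cellsList, c ∈ inv) :
    ((List.range (cellsList.length + 1)).any (fun k =>
      (List.sublistsLen k cellsList).any (fun combo =>
        let mineSet := if is_mine then PySem.Set.add (PySem.Set.ofList combo) target_cell
                       else PySem.Set.ofList combo
        pvCheckA rel inv mineSet)))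
    = pvBT rel inv (if is_mine then [target_cell] else []) cellsList := by
  set mines0 : List (Int × Int) := if is_mine then [target_cell] else [] with hm0
  rw [Bool.eq_iff_iff, pv_anyCombos_iff, pv_bt_iff rel inv cellsList mines0 hri]
  constructor
  · rintro ⟨S, hS, hg⟩
    refine ⟨S, hS, ?_⟩
    rw [← pv_feasible_nil_eq_checkA] at hg
    rw [pv_feasible_mines_congr rel inv (S ++ mines0)
      (if is_mine then PySem.Set.add (PySem.Set.ofList S) target_cell else PySem.Set.ofList S) []
      (by intro x; cases is_mine <;>
        simp [hm0, PySem.Set.mem_add, PySem.Set.mem_ofList])]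
    cases is_mine <;> simpa using hg
  · rintro ⟨S, hS, hv⟩
    refine ⟨S, hS, ?_⟩
    rw [← pv_feasible_nil_eq_checkA]
    rw [pv_feasible_mines_congr rel inv
      (if is_mine then PySem.Set.add (PySem.Set.ofList S) target_cell else PySem.Set.ofList S)
      (S ++ mines0) []
      (by intro x; cases is_mine <;>
        simp [hm0, PySem.Set.mem_add, PySem.Set.mem_ofList])]
    exact hv

-- ===== VERDICT (by name: the statement is the Claim_ definition above) =====
theorem check_assignment_possible_py_spec : Claim_equal_check_assignment_possible_py := by
  intro cells constraints target_cell is_mine _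
  unfold Spec_check_assignment_possible_py
  simp only [check_assignment_possible_py, check_assignment_possible_py_alt]
  refine if_congr Iff.rfl rfl ?_
  exact pv_main _ _ _ target_cell is_mine
    (fun c hc => (PySem.Set.mem_union _ _ _).mpr (Or.inl hc))
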